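-- pv_equiv track=rewrite | github.com/zidanehuang001/Megatron-Bridge | src/megatron/bridge/models/conversion/param_mapping.py | _count_wildcard_groups
-- ===== SOURCE A (Python) =====
-- def _count_wildcard_groups(pattern: str) -> int:
--     """Count the number of wildcard capture groups in a pattern.
--
--     Args:
--         pattern: Pattern string with * and ** wildcards
--
--     Returns:
--         Number of capture groups that will be generated
--
--     Note:
--         ** counts as 1 group, * counts as 1 group
--         ** must be counted before * to avoid double-counting
--     """
--     count = 0
--     remaining = pattern
--
--     # Count ** patterns first
--     while "**" in remaining:
--         count += 1
--         remaining = remaining.replace("**", "", 1)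
--
--     # Count remaining * patterns
--     count += remaining.count("*")
--
--     return count
-- ===== SOURCE B (Python) =====
-- def _count_wildcard_groups(pattern: str) -> int:
--     """Single left-to-right pass: a '*' starts a group; an immediately
--     following '*' joins it (making a double-star group) instead of opening a new one."""
--     count = 0
--     pending = False  # the previous char was a '*' that opened a group
--     for ch in pattern:
--         if ch == '*':
--             if pending:
--                 pending = False  # second star of a double-star group: already counted
--             else:
--                 count += 1
--                 pending = True
--         else:
--             pending = False
--     return count
-- ===== Notes on version B (the rewrite author's own statement) =====
-- stated objective: alternative
-- what changed: Replaced the repeat-search-and-remove loop over double-star occurrences (plus a final star count) with one linear left-to-right pass that pairs each star with an immediately preceding unpaired star.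
import Mathlib
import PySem

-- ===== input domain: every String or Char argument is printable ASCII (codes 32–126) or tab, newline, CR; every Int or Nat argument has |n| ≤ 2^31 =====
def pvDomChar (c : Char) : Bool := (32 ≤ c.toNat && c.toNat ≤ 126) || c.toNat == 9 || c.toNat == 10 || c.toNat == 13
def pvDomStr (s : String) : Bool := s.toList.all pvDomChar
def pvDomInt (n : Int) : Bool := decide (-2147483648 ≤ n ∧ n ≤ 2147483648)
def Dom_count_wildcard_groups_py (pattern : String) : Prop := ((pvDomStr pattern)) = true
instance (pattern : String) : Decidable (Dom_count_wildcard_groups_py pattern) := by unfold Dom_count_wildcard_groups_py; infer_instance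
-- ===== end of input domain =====

-- B replaces A's repeat-search-and-remove loop by one left-to-right pass pairing adjacent stars (alternative decomposition; return values proved equal).

-- ===== PORT A =====
-- hand port of remaining.replace("**", "", 1) (exact for this nonempty, non-overwritten pattern):
-- remove the first occurrence of "**" if there is one, else return the string unchanged
def pvReplaceFirstStarStar (s : List Char) : List Char :=
  let i := PySem.Chars.find s ['*', '*']
  if i = -1 then s else s.take i.toNat ++ s.drop (i.toNat + 2)

theorem pvReplaceFirstStarStar_length_lt (s : List Char)
    (h : PySem.Chars.isIn ['*', '*'] s = true) :
    (pvReplaceFirstStarStar s).length < s.length := by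
  have hinf : ['*', '*'] <:+: s := (PySem.Chars.isIn_iff_infix _ _).1 h
  have hnn : 0 ≤ PySem.Chars.find s ['*', '*'] :=
    (PySem.Chars.find_nonneg_iff s ['*', '*']).2 hinf
  have hspec := PySem.Chars.find_spec (s := s) (sub := ['*', '*']) hnn
  have hle : PySem.Chars.find s ['*', '*'] ≤ s.length := PySem.Chars.find_le_length s ['*', '*']
  have h2 : 2 ≤ (s.drop (PySem.Chars.find s ['*', '*']).toNat).length := by
    have := hspec.1.length_le
    simpa using this
  have hne : PySem.Chars.find s ['*', '*'] ≠ -1 := by omega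
  simp only [pvReplaceFirstStarStar, if_neg hne, List.length_append, List.length_take,
    List.length_drop]
  have hiN : (PySem.Chars.find s ['*', '*']).toNat ≤ s.length := by omega
  simp only [List.length_drop] at h2
  omega

-- the while loop of A: while "**" in remaining: count += 1; remaining = remaining.replace("**", "", 1)
def pvLoopA (count : Int) (remaining : List Char) : Int :=
  if h : PySem.Chars.isIn ['*', '*'] remaining = true then
    pvLoopA (count + 1) (pvReplaceFirstStarStar remaining)
  else
    count + (PySem.Chars.count remaining ['*'] : Int)
termination_by remaining.length
decreasing_by exact pvReplaceFirstStarStar_length_lt _ h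

def count_wildcard_groups_py (pattern : String) : Int :=
  pvLoopA 0 pattern.toList

-- ===== PORT B =====
-- one pass; state = (groups counted so far, previous char was a '*' that opened a group)
def pvStep (st : Int × Bool) (ch : Char) : Int × Bool :=
  if ch = '*' then (if st.2 then (st.1, false) else (st.1 + 1, true)) else (st.1, false)

def count_wildcard_groups_py_alt (pattern : String) : Int :=
  (pattern.toList.foldl pvStep (0, false)).1

-- ===== PRECONDITION & SPEC =====
def Spec_count_wildcard_groups_py (pattern : String) (out : Int) : Prop := out = count_wildcard_groups_py_alt pattern
instance (pattern : String) (out : Int) : Decidable (Spec_count_wildcard_groups_py pattern out) := by unfold Spec_count_wildcard_groups_py; infer_instance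

-- ===== CLAIM (what is proved, stated in full; the proofs are below) =====
def Claim_equal_count_wildcard_groups_py : Prop := ∀ (pattern : String), Dom_count_wildcard_groups_py pattern → Spec_count_wildcard_groups_py pattern (count_wildcard_groups_py pattern)

-- ===== LEMMAS AND PROOFS =====

-- Python str.count with a single-character needle is the character count
theorem pvCountGo_singleton (c : Char) :
    ∀ (l : List Char) (fuel acc : Nat), l.length ≤ fuel →
      PySem.Chars.count.go [c] fuel l acc = acc + l.count c := by
  intro l
  induction l with
  | nil => intro fuel acc _; cases fuel <;> simp [PySem.Chars.count.go]
  | cons x t ih =>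
    intro fuel acc hf
    cases fuel with
    | zero => simp at hf
    | succ n =>
      have hn : t.length ≤ n := by simp only [List.length_cons] at hf; omega
      rw [PySem.Chars.count.go]
      by_cases hx : x = c
      · subst hx
        have hp : List.isPrefixOf [x] (x :: t) = true := by simp [List.isPrefixOf]
        simp only [hp, if_true, List.length_cons, List.length_nil, List.drop_succ_cons,
          List.drop_zero]
        rw [ih n (acc + 1) hn]
        simp
        omega
      · have hp : List.isPrefixOf [c] (x :: t) = false := by
          simp [List.isPrefixOf]
          intro h
          exact hx h.symm
        simp only [hp, Bool.false_eq_true, if_false]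
        rw [ih n acc hn]
        have : ¬ (x = c) := hx
        simp [this]

theorem pvCount_singleton (s : List Char) (c : Char) :
    PySem.Chars.count s [c] = s.count c := by
  unfold PySem.Chars.count
  have he : ([c] : List Char).isEmpty = false := rfl
  rw [he]
  simpa using pvCountGo_singleton c s s.length 0 le_rfl

theorem pvStep_star_false (c : Int) : pvStep (c, false) '*' = (c + 1, true) := by
  simp [pvStep]

theorem pvStep_star_true (c : Int) : pvStep (c, true) '*' = (c, false) := by
  simp [pvStep]

theorem pvStep_nonstar (c : Int) (b : Bool) (x : Char) (hx : ¬ x = '*') :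
    pvStep (c, b) x = (c, false) := by
  simp [pvStep, hx]

-- the counter component of the fold is affine in its start value
theorem pvFold_shift (l : List Char) :
    ∀ (c : Int) (b : Bool), (l.foldl pvStep (c, b)).1 = c + (l.foldl pvStep (0, b)).1 := by
  induction l with
  | nil => intro c b; simp
  | cons x t ih =>
    intro c b
    by_cases hx : x = '*'
    · subst hx
      cases b with
      | false =>
        simp only [List.foldl_cons, pvStep_star_false]
        rw [ih (c + 1) true, ih (0 + 1) true]
        ring
      | true =>
        simp only [List.foldl_cons, pvStep_star_true]
        exact ih c false
    · simp only [List.foldl_cons, pvStep_nonstar _ _ _ hx]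
      exact ih c false

-- if the fold ends with a pending star, the list ends in '*' (or was empty with b pending)
theorem pvFold_pending (l : List Char) :
    ∀ (c : Int) (b : Bool), (l.foldl pvStep (c, b)).2 = true →
      (l = [] ∧ b = true) ∨ ∃ q, l = q ++ ['*'] := by
  induction l with
  | nil => intro c b h; exact Or.inl ⟨rfl, by simpa using h⟩
  | cons x t ih =>
    intro c b h
    simp only [List.foldl_cons] at h
    rcases ih (pvStep (c, b) x).1 (pvStep (c, b) x).2 (by simpa using h) with ⟨ht, hb⟩ | ⟨q, hq⟩
    · subst ht
      right
      have hx : x = '*' := by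
        by_contra hx
        simp [pvStep, hx] at hb
      exact ⟨[], by simp [hx]⟩
    · exact Or.inr ⟨x :: q, by simp [hq]⟩

-- on a string with no adjacent star pair the fold just counts the stars
theorem pvFold_nopair (l : List Char) :
    ∀ (c : Int) (b : Bool), ¬ (['*', '*'] <:+: l) →
      (b = true → l.head? ≠ some '*') →
      (l.foldl pvStep (c, b)).1 = c + (l.count '*' : Int) := by
  induction l with
  | nil => intro c b _ _; simp
  | cons x t ih =>
    intro c b hnp hb
    by_cases hx : x = '*'
    · subst hx
      have hbf : b = false := by
        cases b
        · rfl
        · exact ((hb rfl) rfl).elim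
      subst hbf
      simp only [List.foldl_cons, pvStep_star_false]
      have hth : t.head? ≠ some '*' := by
        intro hh
        cases t with
        | nil => simp at hh
        | cons y u =>
          simp at hh
          subst hh
          exact hnp (List.IsPrefix.isInfix ⟨u, rfl⟩)
      have hnt : ¬ (['*', '*'] <:+: t) := fun h => hnp (List.infix_cons h)
      rw [ih (c + 1) true hnt (fun _ => hth)]
      simp
      ring
    · simp only [List.foldl_cons, pvStep_nonstar _ _ _ hx]
      have hnt : ¬ (['*', '*'] <:+: t) := fun h => hnp (List.infix_cons h)
      rw [ih c false hnt (by simp)]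
      simp [hx]

-- removing the first '**' (whose prefix leaves no pending star) lowers the fold count by 1
theorem pvFold_remove (p r : List Char)
    (hpend : ((p.foldl pvStep ((0 : Int), false)).2) = false) :
    ((p ++ '*' :: '*' :: r).foldl pvStep (0, false)).1 =
      ((p ++ r).foldl pvStep (0, false)).1 + 1 := by
  rw [List.foldl_append, List.foldl_append]
  set st := p.foldl pvStep ((0 : Int), false) with hst
  have hst2 : st = (st.1, false) := by rw [← hpend]
  rw [hst2]
  simp only [List.foldl_cons, pvStep_star_false, pvStep_star_true]
  rw [pvFold_shift r (st.1 + 1) false, pvFold_shift r st.1 false]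
  ring

-- the main induction: A's loop equals the start count plus B's fold
theorem pvLoopA_eq (n : Nat) : ∀ (s : List Char), s.length ≤ n → ∀ (c : Int),
    pvLoopA c s = c + (s.foldl pvStep (0, false)).1 := by
  induction n with
  | zero =>
    intro s hs c
    have hnil : s = [] := List.eq_nil_of_length_eq_zero (Nat.le_zero.1 hs)
    subst hnil
    rw [pvLoopA]
    simp [PySem.Chars.isIn, PySem.Chars.find, PySem.Chars.find.go, PySem.Chars.count]
  | succ n ih =>
    intro s hs c
    rw [pvLoopA]
    by_cases h : PySem.Chars.isIn ['*', '*'] s = true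
    · rw [dif_pos h]
      have hinf : ['*', '*'] <:+: s := (PySem.Chars.isIn_iff_infix _ _).1 h
      have hnn : (0 : Int) ≤ PySem.Chars.find s ['*', '*'] :=
        (PySem.Chars.find_nonneg_iff s _).2 hinf
      obtain ⟨hpre, hmin⟩ := PySem.Chars.find_spec (s := s) (sub := ['*', '*']) hnn
      set i := (PySem.Chars.find s ['*', '*']).toNat with hi
      obtain ⟨r, hr⟩ := hpre
      have hr' : '*' :: '*' :: r = s.drop i := by simpa using hr
      have hile : i ≤ s.length := by
        have := PySem.Chars.find_le_length s ['*', '*']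
        omega
      have hs' : s = s.take i ++ '*' :: '*' :: r := by
        conv_lhs => rw [← List.take_append_drop i s]
        rw [← hr']
      have hlenp : (s.take i).length = i := by simp [hile]
      have hdrop : s.drop (i + 2) = r := by
        calc s.drop (i + 2) = (s.drop i).drop 2 := List.drop_drop.symm
          _ = r := by
            rw [← hr']
            simp
      have hne : PySem.Chars.find s ['*', '*'] ≠ -1 := by omega
      have hrepl : pvReplaceFirstStarStar s = s.take i ++ r := by
        simp only [pvReplaceFirstStarStar, if_neg hne]
        rw [← hi, hdrop]
      have hpend : ((s.take i).foldl pvStep ((0 : Int), false)).2 = false := by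
        by_contra hp
        have hp' : ((s.take i).foldl pvStep ((0 : Int), false)).2 = true := by
          simpa using hp
        rcases pvFold_pending (s.take i) 0 false hp' with ⟨_, hfb⟩ | ⟨q, hq⟩
        · exact Bool.false_ne_true hfb
        · have hql : q.length + 1 = i := by
            rw [hq] at hlenp
            simpa using hlenp
          have hsq : s = q ++ ('*' :: '*' :: '*' :: r) := by
            rw [hs', hq]
            simp
          have hocc : ['*', '*'] <+: s.drop q.length := by
            rw [hsq, List.drop_left]
            exact ⟨'*' :: r, rfl⟩
          exact hmin q.length (by omega) hocc
      have hlt : (pvReplaceFirstStarStar s).length < s.length :=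
        pvReplaceFirstStarStar_length_lt s h
      rw [ih (pvReplaceFirstStarStar s) (by omega) (c + 1)]
      rw [hrepl]
      conv_rhs => rw [hs']
      rw [pvFold_remove (s.take i) r hpend]
      ring
    · rw [dif_neg h]
      have hni : ¬ (['*', '*'] <:+: s) := by
        intro hinf
        exact h ((PySem.Chars.isIn_iff_infix _ _).2 hinf)
      rw [pvCount_singleton, pvFold_nopair s 0 false hni (by simp)]
      omega

-- ===== VERDICT (by name: the statement is the Claim_ definition above) =====
theorem count_wildcard_groups_py_spec : Claim_equal_count_wildcard_groups_py := by
  intro pattern _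
  unfold Spec_count_wildcard_groups_py count_wildcard_groups_py count_wildcard_groups_py_alt
  rw [pvLoopA_eq pattern.toList.length pattern.toList le_rfl 0]
  simp
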